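-- pv_equiv track=rewrite | github.com/MiccWan/Game-Algorithms | w7/nim.py | getAvailables
-- ===== SOURCE A (Python) =====
-- def getAvailables(n, most_take=3):
-- 	availables = []
--
-- 	for take in range(1, most_take + 1):
--
-- 		## ud = up to down
-- 		## lurd = left-up to right-down
-- 		## lr = left to right
-- 		for i in range(n + 1 - take):
-- 			for j in range(i + 1):
-- 				ud, lr, lurd = 0, 0, 0
-- 				botton_pos = ((i+take-1)*(i+take) >> 1) + j
-- 				for k in range(take):
-- 					layer_k_pos = ((i+k)*(i+k+1) >> 1) + j
-- 					ud |= 1 << (layer_k_pos)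
-- 					lr |= 1 << (botton_pos + k)
-- 					lurd |= 1 << (layer_k_pos + k)
--
-- 				availables.append(ud)
-- 				availables.append(lr)
-- 				availables.append(lurd)
--
-- 	return sorted(availables)
-- ===== SOURCE B (Python) =====
-- def getAvailables(n, most_take=3):
-- 	if most_take < 1:
-- 		return []
-- 	availables = []
-- 	for i in range(n):
-- 		for j in range(i + 1):
-- 			ud = lurd = 0
-- 			for take in range(1, min(most_take, n - i) + 1):
-- 				k = take - 1
-- 				layer = ((i + k) * (i + k + 1) >> 1) + j
-- 				ud |= 1 << layer
-- 				lurd |= 1 << (layer + k)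
-- 				lr = ((1 << take) - 1) << layer
-- 				availables.append(ud)
-- 				availables.append(lr)
-- 				availables.append(lurd)
-- 	return sorted(availables)
-- ===== Notes on version B (the rewrite author's own statement) =====
-- stated objective: alternative
-- what changed: A loops length-outer (take, then i, then j) and rebuilds each of the three masks with an inner k-loop of OR operations; B loops position-outer over each start cell (i, j) and grows the segment length incrementally, maintaining running ud/lurd masks across lengths and computing the horizontal mask as a closed-form bit run ((1<<take)-1)<<layer, so the inner k-loop disappears; the final sort makes the changed generation order irrelevant.
import Mathlib
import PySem

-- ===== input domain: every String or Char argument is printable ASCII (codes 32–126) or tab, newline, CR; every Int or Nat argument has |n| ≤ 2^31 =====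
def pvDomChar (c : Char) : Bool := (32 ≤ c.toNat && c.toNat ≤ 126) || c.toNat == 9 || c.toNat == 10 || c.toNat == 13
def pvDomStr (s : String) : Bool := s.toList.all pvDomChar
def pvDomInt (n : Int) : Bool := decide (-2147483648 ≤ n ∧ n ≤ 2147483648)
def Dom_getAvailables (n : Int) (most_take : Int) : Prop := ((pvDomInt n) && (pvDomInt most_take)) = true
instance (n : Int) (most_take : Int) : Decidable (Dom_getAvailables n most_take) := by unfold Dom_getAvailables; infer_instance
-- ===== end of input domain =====

-- B reorganises A's length-outer triple loop into a position-outer one: for each start cell it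
-- grows the three segments incrementally (running ud/lurd masks, a closed-form bit-run for lr),
-- removing A's inner k-loop; objective: alternative (sorting makes generation order irrelevant).

-- ===== PORT A =====
-- A-side helper: the body of A's inner `for k in range(take)` loop (shift counts are ≥ 0 at
-- every iteration actually reached, so `.toNat` on them is exact).
def aInner (take i j : Int) : Int × Int × Int :=
  let botton_pos : Int := (((i + take - 1) * (i + take)) >>> (1 : Nat)) + j
  (PySem.List.pyRange 0 take).foldl
    (fun (s : Int × Int × Int) k =>
      let layer_k_pos : Int := (((i + k) * (i + k + 1)) >>> (1 : Nat)) + j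
      (PySem.Int.bor s.1 (1 <<< layer_k_pos.toNat),
       PySem.Int.bor s.2.1 (1 <<< (botton_pos + k).toNat),
       PySem.Int.bor s.2.2 (1 <<< (layer_k_pos + k).toNat)))
    (0, 0, 0)

def getAvailables (n : Int) (most_take : Int) : List Int :=
  let availables : List Int :=
    (PySem.List.pyRange 1 (most_take + 1)).foldl (fun availables take =>
      (PySem.List.pyRange 0 (n + 1 - take)).foldl (fun availables i =>
        (PySem.List.pyRange 0 (i + 1)).foldl (fun availables j =>
          let s := aInner take i j
          availables ++ [s.1, s.2.1, s.2.2]) availables) availables) []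
  PySem.List.sorted availables (fun x => x)

-- ===== PORT B =====
-- B-side helper: the body of B's `for take in range(1, min(most_take, n-i)+1)` loop; the state is
-- (availables, ud, lurd).  Shift counts are ≥ 0 at every reached iteration, so `.toNat` is exact.
def bStep (i j : Int) (st : List Int × Int × Int) (take : Int) : List Int × Int × Int :=
  let k := take - 1
  let layer : Int := (((i + k) * (i + k + 1)) >>> (1 : Nat)) + j
  let ud := PySem.Int.bor st.2.1 (1 <<< layer.toNat)
  let lurd := PySem.Int.bor st.2.2 (1 <<< (layer + k).toNat)
  let lr := ((1 <<< take.toNat) - 1) <<< layer.toNat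
  (st.1 ++ [ud, lr, lurd], ud, lurd)

def getAvailables_alt (n : Int) (most_take : Int) : List Int :=
  if most_take < 1 then [] else
  let availables : List Int :=
    (PySem.List.pyRange 0 n).foldl (fun availables i =>
      (PySem.List.pyRange 0 (i + 1)).foldl (fun availables j =>
        ((PySem.List.pyRange 1 (min most_take (n - i) + 1)).foldl (bStep i j)
          (availables, 0, 0)).1) availables) []
  PySem.List.sorted availables (fun x => x)

-- ===== PRECONDITION & SPEC =====
def Spec_getAvailables (n : Int) (most_take : Int) (out : List Int) : Prop := out = getAvailables_alt n most_take
instance (n : Int) (most_take : Int) (out : List Int) : Decidable (Spec_getAvailables n most_take out) := by unfold Spec_getAvailables; infer_instance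

-- ===== CLAIM (what is proved, stated in full; the proofs are below) =====
def Claim_equal_getAvailables : Prop := ∀ (n : Int) (most_take : Int), Dom_getAvailables n most_take → Spec_getAvailables n most_take (getAvailables n most_take)

-- ===== LEMMAS AND PROOFS =====

-- The three accumulator components of A's inner loop, as separate folds.
def audF (i j : Int) (u k : Int) : Int :=
  PySem.Int.bor u (1 <<< ((((i + k) * (i + k + 1)) >>> (1 : Nat)) + j).toNat)
def alurdF (i j : Int) (u k : Int) : Int :=
  PySem.Int.bor u (1 <<< (((((i + k) * (i + k + 1)) >>> (1 : Nat)) + j) + k).toNat)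
def alrF (b : Int) (u k : Int) : Int := PySem.Int.bor u (1 <<< (b + k).toNat)

def aud (i j t : Int) : Int := (PySem.List.pyRange 0 t).foldl (audF i j) 0
def alurd (i j t : Int) : Int := (PySem.List.pyRange 0 t).foldl (alurdF i j) 0
def alr (i j take : Int) : Int :=
  (PySem.List.pyRange 0 take).foldl (alrF ((((i + take - 1) * (i + take)) >>> (1 : Nat)) + j)) 0

-- The triple A appends for a given (take, i, j).
def F (t i j : Int) : List Int := [aud i j t, alr i j t, alurd i j t]

lemma aInner_eq (take i j : Int) :
    aInner take i j = (aud i j take, alr i j take, alurd i j take) := by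
  unfold aInner aud alr alurd audF alurdF alrF
  rw [PySem.List.foldl_prod_mk
        (f := fun (u : Int) k => PySem.Int.bor u (1 <<< ((((i + k) * (i + k + 1)) >>> (1 : Nat)) + j).toNat))
        (g := fun (p : Int × Int) k =>
          (PySem.Int.bor p.1 (1 <<< (((((i + take - 1) * (i + take)) >>> (1 : Nat)) + j) + k).toNat),
           PySem.Int.bor p.2 (1 <<< (((((i + k) * (i + k + 1)) >>> (1 : Nat)) + j) + k).toNat)))]
  rw [PySem.List.foldl_prod_mk
        (f := fun (u : Int) k =>
          PySem.Int.bor u (1 <<< (((((i + take - 1) * (i + take)) >>> (1 : Nat)) + j) + k).toNat))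
        (g := fun (u : Int) k =>
          PySem.Int.bor u (1 <<< (((((i + k) * (i + k + 1)) >>> (1 : Nat)) + j) + k).toNat))]

-- OR of a run of t consecutive bits starting at b is ((1 << t) - 1) << b.
lemma natRun (T b : Nat) : (2 ^ T - 1) * 2 ^ b ||| 2 ^ (b + T) = (2 ^ (T + 1) - 1) * 2 ^ b := by
  apply Nat.eq_of_testBit_eq
  intro i
  rw [← Nat.shiftLeft_eq, ← Nat.shiftLeft_eq]
  simp only [Nat.testBit_lor, Nat.testBit_shiftLeft, Nat.testBit_two_pow, Nat.testBit_two_pow_sub_one]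
  by_cases h1 : b ≤ i <;> by_cases h2 : i - b < T <;> by_cases h3 : b + T = i <;>
    simp [h1, h2, h3] <;> omega

lemma natRun' (T b : Nat) : (1 <<< T - 1) <<< b ||| 1 <<< (b + T) = (1 <<< (T + 1) - 1) <<< b := by
  simp only [Nat.shiftLeft_eq, one_mul]
  exact natRun T b

lemma run_or (T b : Nat) :
    (PySem.List.pyRange 0 (T : Int)).foldl (alrF (b : Int)) 0 = ((1 <<< T) - 1) <<< b := by
  induction T with
  | zero =>
    simp only [Nat.cast_zero]
    rw [PySem.List.pyRange_one_eq_nil (le_refl (0 : Int))]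
    simp
  | succ T ih =>
    have h1 : ((T + 1 : Nat) : Int) = (T : Int) + 1 := by push_cast; ring
    rw [h1, PySem.List.pyRange_one_succ_right (by positivity), List.foldl_append, ih]
    simp only [List.foldl_cons, List.foldl_nil]
    unfold alrF
    have h2 : ((b : Int) + (T : Int)).toNat = b + T := by omega
    rw [h2, PySem.Int.bor_natCast, natRun' T b]

lemma aud_succ (i j : Int) (T : Nat) :
    aud i j ((T : Int) + 1) = audF i j (aud i j (T : Int)) (T : Int) := by
  unfold aud
  rw [PySem.List.pyRange_one_succ_right (by positivity), List.foldl_append]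
  rfl

lemma alurd_succ (i j : Int) (T : Nat) :
    alurd i j ((T : Int) + 1) = alurdF i j (alurd i j (T : Int)) (T : Int) := by
  unfold alurd
  rw [PySem.List.pyRange_one_succ_right (by positivity), List.foldl_append]
  rfl

lemma alr_closed (i j : Int) (hi : 0 ≤ i) (hj : 0 ≤ j) (T : Nat) :
    alr i j (T : Int) = ((1 <<< T) - 1) <<<
      (((((i + (T : Int) - 1) * (i + (T : Int))) >>> (1 : Nat)) + j).toNat) := by
  have hprod : 0 ≤ (i + (T : Int) - 1) * (i + (T : Int)) := by
    rcases eq_or_lt_of_le (by omega : (0 : Int) ≤ i + (T : Int)) with h | h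
    · rw [← h]; simp
    · exact mul_nonneg (by omega) (by omega)
  have hbp : 0 ≤ (((i + (T : Int) - 1) * (i + (T : Int))) >>> (1 : Nat)) + j := by
    rw [Int.shiftRight_eq_div_pow]
    have := Int.ediv_nonneg hprod (by norm_num : (0 : Int) ≤ ((2 ^ 1 : Nat) : Int))
    omega
  have key : alrF ((((((i + (T : Int) - 1) * (i + (T : Int))) >>> (1 : Nat)) + j).toNat : Int))
      = alrF ((((i + (T : Int) - 1) * (i + (T : Int))) >>> (1 : Nat)) + j) := by
    rw [Int.toNat_of_nonneg hbp]
  unfold alr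
  rw [← key]
  exact run_or T _

-- B's take-loop from a fresh (·, 0, 0) state appends exactly A's triples F t i j.
lemma bLoop (i j : Int) (hi : 0 ≤ i) (hj : 0 ≤ j) (T : Nat) (acc : List Int) :
    (PySem.List.pyRange 1 ((T : Int) + 1)).foldl (bStep i j) (acc, 0, 0)
      = (acc ++ (PySem.List.pyRange 1 ((T : Int) + 1)).flatMap (fun t => F t i j),
         aud i j (T : Int), alurd i j (T : Int)) := by
  induction T generalizing acc with
  | zero =>
    simp only [Nat.cast_zero, zero_add]
    rw [PySem.List.pyRange_one_eq_nil (le_refl (1 : Int))]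
    simp [aud, alurd, PySem.List.pyRange_one_eq_nil (le_refl (0 : Int))]
  | succ T ih =>
    have h1 : ((T + 1 : Nat) : Int) = (T : Int) + 1 := by push_cast; ring
    rw [h1, PySem.List.pyRange_one_succ_right (by omega), List.foldl_append,
        List.flatMap_append, ih]
    simp only [List.foldl_cons, List.foldl_nil, List.flatMap_cons, List.flatMap_nil,
      List.append_nil]
    unfold bStep
    have hk : ((T : Int) + 1 - 1) = (T : Int) := by ring
    simp only [hk]
    have hud : PySem.Int.bor (aud i j (T : Int))
        ((1 <<< ((((i + (T : Int)) * (i + (T : Int) + 1)) >>> (1 : Nat)) + j).toNat : Nat) : Int)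
        = aud i j ((T : Int) + 1) := by
      rw [aud_succ]; rfl
    have hlurd : PySem.Int.bor (alurd i j (T : Int))
        ((1 <<< (((((i + (T : Int)) * (i + (T : Int) + 1)) >>> (1 : Nat)) + j) + (T : Int)).toNat : Nat) : Int)
        = alurd i j ((T : Int) + 1) := by
      rw [alurd_succ]; rfl
    have hlr : (((1 <<< ((T : Int) + 1).toNat - 1) <<<
          ((((i + (T : Int)) * (i + (T : Int) + 1)) >>> (1 : Nat)) + j).toNat : Nat) : Int)
        = alr i j ((T : Int) + 1) := by
      have hbp : ((i + ((T + 1 : Nat) : Int) - 1) * (i + ((T + 1 : Nat) : Int)))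
          = ((i + (T : Int)) * (i + (T : Int) + 1)) := by push_cast; ring
      rw [show ((T : Int) + 1) = (((T + 1 : Nat) : Int)) from by push_cast; ring,
          alr_closed i j hi hj (T + 1), hbp]
      simp
    rw [hud, hlurd, hlr]
    simp [F, List.append_assoc]

lemma bLoop' (i j m : Int) (hi : 0 ≤ i) (hj : 0 ≤ j) (acc : List Int) :
    ((PySem.List.pyRange 1 (m + 1)).foldl (bStep i j) (acc, 0, 0)).1
      = acc ++ (PySem.List.pyRange 1 (m + 1)).flatMap (fun t => F t i j) := by
  by_cases hm : m ≤ 0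
  · rw [PySem.List.pyRange_one_eq_nil (by omega)]
    simp
  · have : m = ((m.toNat : Int)) := by omega
    rw [this, bLoop i j hi hj m.toNat acc]

lemma A_unsorted (n mt : Int) :
    getAvailables n mt = PySem.List.sorted
      ((PySem.List.pyRange 1 (mt + 1)).flatMap (fun t =>
        (PySem.List.pyRange 0 (n + 1 - t)).flatMap (fun i =>
          (PySem.List.pyRange 0 (i + 1)).flatMap (fun j => F t i j)))) (fun x => x) := by
  unfold getAvailables
  have hj : ∀ (t i : Int) (acc : List Int),
      (PySem.List.pyRange 0 (i + 1)).foldl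
        (fun availables j => let s := aInner t i j; availables ++ [s.1, s.2.1, s.2.2]) acc
        = acc ++ (PySem.List.pyRange 0 (i + 1)).flatMap (fun j => F t i j) := by
    intro t i acc
    rw [PySem.List.foldl_congr_mem _ _ (fun acc j => acc ++ F t i j) _
      (by intro acc j _; show acc ++ _ = _; rw [aInner_eq]; rfl)]
    exact PySem.List.foldl_append_eq_flatMap _ _ _
  have hi : ∀ (t : Int) (acc : List Int),
      (PySem.List.pyRange 0 (n + 1 - t)).foldl
        (fun availables i => (PySem.List.pyRange 0 (i + 1)).foldl
          (fun availables j => let s := aInner t i j; availables ++ [s.1, s.2.1, s.2.2]) availables) acc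
        = acc ++ (PySem.List.pyRange 0 (n + 1 - t)).flatMap
            (fun i => (PySem.List.pyRange 0 (i + 1)).flatMap (fun j => F t i j)) := by
    intro t acc
    rw [PySem.List.foldl_congr_mem _ _
      (fun acc i => acc ++ (PySem.List.pyRange 0 (i + 1)).flatMap (fun j => F t i j)) _
      (by intro acc i _; exact hj t i acc)]
    exact PySem.List.foldl_append_eq_flatMap _ _ _
  rw [PySem.List.foldl_congr_mem _ _
    (fun acc t => acc ++ (PySem.List.pyRange 0 (n + 1 - t)).flatMap
      (fun i => (PySem.List.pyRange 0 (i + 1)).flatMap (fun j => F t i j))) _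
    (by intro acc t _; exact hi t acc)]
  rw [PySem.List.foldl_append_eq_flatMap]
  rfl

lemma B_unsorted (n mt : Int) :
    getAvailables_alt n mt = PySem.List.sorted
      ((PySem.List.pyRange 0 n).flatMap (fun i =>
        (PySem.List.pyRange 0 (i + 1)).flatMap (fun j =>
          (PySem.List.pyRange 1 (min mt (n - i) + 1)).flatMap (fun t => F t i j)))) (fun x => x) := by
  unfold getAvailables_alt
  by_cases hmt : mt < 1
  · rw [if_pos hmt]
    have hz : (PySem.List.pyRange 0 n).flatMap (fun i =>
        (PySem.List.pyRange 0 (i + 1)).flatMap (fun j =>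
          (PySem.List.pyRange 1 (min mt (n - i) + 1)).flatMap (fun t => F t i j))) = [] := by
      apply List.flatMap_eq_nil_iff.mpr
      intro i _
      apply List.flatMap_eq_nil_iff.mpr
      intro j _
      rw [PySem.List.pyRange_one_eq_nil (by omega)]
      rfl
    rw [hz]
    rfl
  · rw [if_neg hmt]
    have hj : ∀ (i : Int), 0 ≤ i → ∀ (acc : List Int),
        (PySem.List.pyRange 0 (i + 1)).foldl
          (fun availables j =>
            ((PySem.List.pyRange 1 (min mt (n - i) + 1)).foldl (bStep i j) (availables, 0, 0)).1) acc
          = acc ++ (PySem.List.pyRange 0 (i + 1)).flatMap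
              (fun j => (PySem.List.pyRange 1 (min mt (n - i) + 1)).flatMap (fun t => F t i j)) := by
      intro i hi acc
      rw [PySem.List.foldl_congr_mem _ _
        (fun acc j => acc ++ (PySem.List.pyRange 1 (min mt (n - i) + 1)).flatMap (fun t => F t i j)) _
        (by
          intro acc j hjm
          have hj0 : 0 ≤ j := (PySem.List.mem_pyRange_one.mp hjm).1
          exact bLoop' i j _ hi hj0 acc)]
      exact PySem.List.foldl_append_eq_flatMap _ _ _
    rw [PySem.List.foldl_congr_mem _ _
      (fun acc i => acc ++ (PySem.List.pyRange 0 (i + 1)).flatMap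
        (fun j => (PySem.List.pyRange 1 (min mt (n - i) + 1)).flatMap (fun t => F t i j))) _
      (by
        intro acc i him
        exact hj i (PySem.List.mem_pyRange_one.mp him).1 acc)]
    rw [PySem.List.foldl_append_eq_flatMap]
    rfl

-- The index-triple lists the two programs enumerate, in their respective orders.
def PA (n mt : Int) : List (Int × Int × Int) :=
  (PySem.List.pyRange 1 (mt + 1)).flatMap (fun t =>
    (PySem.List.pyRange 0 (n + 1 - t)).flatMap (fun i =>
      (PySem.List.pyRange 0 (i + 1)).map (fun j => (t, i, j))))
def PB (n mt : Int) : List (Int × Int × Int) :=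
  (PySem.List.pyRange 0 n).flatMap (fun i =>
    (PySem.List.pyRange 0 (i + 1)).flatMap (fun j =>
      (PySem.List.pyRange 1 (min mt (n - i) + 1)).map (fun t => (t, i, j))))

lemma mem_PA (n mt : Int) (p : Int × Int × Int) :
    p ∈ PA n mt ↔ 1 ≤ p.1 ∧ p.1 < mt + 1 ∧ 0 ≤ p.2.1 ∧ p.2.1 < n + 1 - p.1 ∧
      0 ≤ p.2.2 ∧ p.2.2 < p.2.1 + 1 := by
  obtain ⟨t, i, j⟩ := p
  simp only [PA, List.mem_flatMap, List.mem_map, PySem.List.mem_pyRange_one, Prod.mk.injEq]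
  constructor
  · rintro ⟨t', ht', i', hi', j', hj', rfl, rfl, rfl⟩
    omega
  · rintro ⟨h1, h2, h3, h4, h5, h6⟩
    exact ⟨t, ⟨h1, h2⟩, i, ⟨h3, h4⟩, j, ⟨h5, h6⟩, rfl, rfl, rfl⟩

lemma mem_PB (n mt : Int) (p : Int × Int × Int) :
    p ∈ PB n mt ↔ 1 ≤ p.1 ∧ p.1 < mt + 1 ∧ 0 ≤ p.2.1 ∧ p.2.1 < n + 1 - p.1 ∧
      0 ≤ p.2.2 ∧ p.2.2 < p.2.1 + 1 := by
  obtain ⟨t, i, j⟩ := p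
  simp only [PB, List.mem_flatMap, List.mem_map, PySem.List.mem_pyRange_one, Prod.mk.injEq]
  constructor
  · rintro ⟨i', hi', j', hj', t', ht', rfl, rfl, rfl⟩
    omega
  · rintro ⟨h1, h2, h3, h4, h5, h6⟩
    exact ⟨i, ⟨h3, by omega⟩, j, ⟨h5, h6⟩, t, ⟨h1, by omega⟩, rfl, rfl, rfl⟩

lemma nodup_triple_map {l : List Int} (f : Int → Int × Int × Int)
    (hinj : ∀ a b, f a = f b → a = b) (h : l.Nodup) : (l.map f).Nodup :=
  h.map (fun a b hab => hinj a b hab)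

lemma nodup_PA (n mt : Int) : (PA n mt).Nodup := by
  apply List.nodup_flatMap.mpr
  refine ⟨?_, ?_⟩
  · intro t _
    apply List.nodup_flatMap.mpr
    refine ⟨?_, ?_⟩
    · intro i _
      exact nodup_triple_map _ (fun a b hab => by simpa using hab)
        (PySem.List.nodup_pyRange_one _ _)
    · refine (PySem.List.nodup_pyRange_one _ _).imp ?_
      intro i1 i2 hne p hp1 hp2
      simp only [List.mem_map] at hp1 hp2
      obtain ⟨j1, _, rfl⟩ := hp1
      obtain ⟨j2, _, h2⟩ := hp2
      have h3 := congrArg (fun q : Int × Int × Int => q.2.1) h2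
      simp only at h3
      exact hne h3.symm
  · refine (PySem.List.nodup_pyRange_one _ _).imp ?_
    intro t1 t2 hne p hp1 hp2
    simp only [List.mem_flatMap, List.mem_map] at hp1 hp2
    obtain ⟨i1, _, j1, _, rfl⟩ := hp1
    obtain ⟨i2, _, j2, _, h2⟩ := hp2
    have h3 := congrArg (fun q : Int × Int × Int => q.1) h2
    simp only at h3
    exact hne h3.symm

lemma nodup_PB (n mt : Int) : (PB n mt).Nodup := by
  apply List.nodup_flatMap.mpr
  refine ⟨?_, ?_⟩
  · intro i _
    apply List.nodup_flatMap.mpr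
    refine ⟨?_, ?_⟩
    · intro j _
      exact nodup_triple_map _ (fun a b hab => by simpa using hab)
        (PySem.List.nodup_pyRange_one _ _)
    · refine (PySem.List.nodup_pyRange_one _ _).imp ?_
      intro j1 j2 hne p hp1 hp2
      simp only [List.mem_map] at hp1 hp2
      obtain ⟨t1, _, rfl⟩ := hp1
      obtain ⟨t2, _, h2⟩ := hp2
      have h3 := congrArg (fun q : Int × Int × Int => q.2.2) h2
      simp only at h3
      exact hne h3.symm
  · refine (PySem.List.nodup_pyRange_one _ _).imp ?_
    intro i1 i2 hne p hp1 hp2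
    simp only [List.mem_flatMap, List.mem_map] at hp1 hp2
    obtain ⟨j1, _, t1, _, rfl⟩ := hp1
    obtain ⟨j2, _, t2, _, h2⟩ := hp2
    have h3 := congrArg (fun q : Int × Int × Int => q.2.1) h2
    simp only at h3
    exact hne h3.symm

lemma perm_PA_PB (n mt : Int) : (PA n mt).Perm (PB n mt) := by
  refine List.perm_of_nodup_nodup_toFinset_eq (nodup_PA n mt) (nodup_PB n mt) ?_
  ext p
  simp only [List.mem_toFinset, mem_PA, mem_PB]

-- ===== VERDICT (by name: the statement is the Claim_ definition above) =====
theorem getAvailables_spec : Claim_equal_getAvailables := by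
  intro n mt _
  unfold Spec_getAvailables
  rw [A_unsorted, B_unsorted]
  have hA : (PySem.List.pyRange 1 (mt + 1)).flatMap (fun t =>
      (PySem.List.pyRange 0 (n + 1 - t)).flatMap (fun i =>
        (PySem.List.pyRange 0 (i + 1)).flatMap (fun j => F t i j)))
      = (PA n mt).flatMap (fun p => F p.1 p.2.1 p.2.2) := by
    simp [PA, List.flatMap_assoc, List.flatMap_map]
  have hB : (PySem.List.pyRange 0 n).flatMap (fun i =>
      (PySem.List.pyRange 0 (i + 1)).flatMap (fun j =>
        (PySem.List.pyRange 1 (min mt (n - i) + 1)).flatMap (fun t => F t i j)))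
      = (PB n mt).flatMap (fun p => F p.1 p.2.1 p.2.2) := by
    simp [PB, List.flatMap_assoc, List.flatMap_map]
  rw [hA, hB]
  exact PySem.List.sorted_eq_sorted_of_perm _ _ _ (fun a b h => h)
    (List.Perm.flatMap_right _ (perm_PA_PB n mt))
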